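-- pv_equiv track=rewrite | github.com/masenar/QMPrimers | common.py | get_Nend_missmatches
-- ===== SOURCE A (Python) =====
-- def get_Nend_missmatches(Nend_misses, rm_loc, flen, fm_loc):
--         rm_Nend = 0
--         for i in rm_loc:
--             if(i >= Nend_misses):
--                 break;
--             rm_Nend +=1
--
--         fm_Nend = 0
--         Nend_misses = flen - Nend_misses
--         for i in range(1, len(fm_loc)+1):
--             if(fm_loc[-i] < Nend_misses):
--                 break;
--             fm_Nend +=1
--         return fm_Nend, rm_Nend
-- ===== SOURCE B (Python) =====
-- def get_Nend_missmatches(Nend_misses, rm_loc, flen, fm_loc):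
--     # index of the first element >= Nend_misses, found by a backward sweep
--     # (smaller indices overwrite), defaulting to len(rm_loc)
--     n = len(rm_loc)
--     rm_Nend = n
--     for i in range(n - 1, -1, -1):
--         if rm_loc[i] >= Nend_misses:
--             rm_Nend = i
--     # length of the maximal suffix of fm_loc with all values >= flen - Nend_misses,
--     # as a forward run-length counter that resets on a miss
--     thr = flen - Nend_misses
--     fm_Nend = 0
--     for v in fm_loc:
--         fm_Nend = fm_Nend + 1 if v >= thr else 0
--     return fm_Nend, rm_Nend
-- ===== Notes on version B (the rewrite author's own statement) =====
-- stated objective: alternative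
-- what changed: replaces A's two early-exit scans (forward prefix count with break; backward negative-index count with break) by break-free sweeps in the opposite direction: a backward sweep that keeps the minimal qualifying index for rm_loc, and a forward run-length counter that resets on a miss for fm_loc
import Mathlib
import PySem

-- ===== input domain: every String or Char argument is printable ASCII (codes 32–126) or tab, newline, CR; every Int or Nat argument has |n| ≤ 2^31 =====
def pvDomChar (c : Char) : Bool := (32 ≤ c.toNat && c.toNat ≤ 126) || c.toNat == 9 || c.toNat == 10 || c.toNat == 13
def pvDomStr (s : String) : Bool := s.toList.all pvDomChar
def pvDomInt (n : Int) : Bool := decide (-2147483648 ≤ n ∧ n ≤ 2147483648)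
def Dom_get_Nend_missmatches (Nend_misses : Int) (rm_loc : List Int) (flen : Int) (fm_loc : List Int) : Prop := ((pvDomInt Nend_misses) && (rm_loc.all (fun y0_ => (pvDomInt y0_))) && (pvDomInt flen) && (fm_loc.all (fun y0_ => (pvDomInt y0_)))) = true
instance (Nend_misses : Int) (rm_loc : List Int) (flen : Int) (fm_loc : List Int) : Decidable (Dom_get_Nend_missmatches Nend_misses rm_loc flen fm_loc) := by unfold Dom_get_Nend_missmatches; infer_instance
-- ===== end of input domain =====

-- B reverses the traversal direction of both scans and replaces early-exit breaks with
-- maintained state (minimal qualifying index / suffix run length); objective: alternative.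


-- ===== PORT A =====
-- first loop of A: count elements until the first one ≥ Nend_misses (break)
def pvRmLoop (N : Int) : List Int → Int → Int
  | [], acc => acc
  | i :: t, acc => if i ≥ N then acc else pvRmLoop N t (acc + 1)

-- second loop of A: i runs from 1 to len(fm_loc); fm_loc[-i] is Python negative
-- indexing (PySem.List.pyGet?); break at the first value < N; fuel = remaining iterations
def pvFmLoop (fm : List Int) (N : Int) : Nat → Nat → Int → Int
  | _, 0, acc => acc
  | i, fuel + 1, acc =>
    match PySem.List.pyGet? fm (-(i : Int)) with
    | none => acc  -- unreachable for 1 ≤ i ≤ len(fm)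
    | some v => if v < N then acc else pvFmLoop fm N (i + 1) fuel (acc + 1)

def get_Nend_missmatches (Nend_misses : Int) (rm_loc : List Int) (flen : Int) (fm_loc : List Int) : Int × Int :=
  let rm_Nend := pvRmLoop Nend_misses rm_loc 0
  let N2 := flen - Nend_misses
  let fm_Nend := pvFmLoop fm_loc N2 1 fm_loc.length 0
  (fm_Nend, rm_Nend)

-- ===== PORT B =====
-- Source B's 'for i in range(n-1, -1, -1)' ported by hand as a countdown recursion
-- (index i+1-1 = i processed, then recurse); rm_loc[i] is always in range (0 ≤ i < n),
-- so PySem.List.pyGetD with a dummy default is exact here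
def pvRmScan (N : Int) (rm : List Int) : Nat → Int → Int
  | 0, acc => acc
  | i + 1, acc => pvRmScan N rm i (if PySem.List.pyGetD rm (i : Int) 0 ≥ N then (i : Int) else acc)

def get_Nend_missmatches_alt (Nend_misses : Int) (rm_loc : List Int) (flen : Int) (fm_loc : List Int) : Int × Int :=
  let n := rm_loc.length
  let rm_Nend := pvRmScan Nend_misses rm_loc n (n : Int)
  let thr := flen - Nend_misses
  let fm_Nend := fm_loc.foldl (fun acc v => if v ≥ thr then acc + 1 else 0) 0
  (fm_Nend, rm_Nend)

-- ===== PRECONDITION & SPEC =====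
def Spec_get_Nend_missmatches (Nend_misses : Int) (rm_loc : List Int) (flen : Int) (fm_loc : List Int) (out : Int × Int) : Prop := out = get_Nend_missmatches_alt Nend_misses rm_loc flen fm_loc
instance (Nend_misses : Int) (rm_loc : List Int) (flen : Int) (fm_loc : List Int) (out : Int × Int) : Decidable (Spec_get_Nend_missmatches Nend_misses rm_loc flen fm_loc out) := by unfold Spec_get_Nend_missmatches; infer_instance

-- ===== CLAIM (what is proved, stated in full; the proofs are below) =====
def Claim_equal_get_Nend_missmatches : Prop := ∀ (Nend_misses : Int) (rm_loc : List Int) (flen : Int) (fm_loc : List Int), Dom_get_Nend_missmatches Nend_misses rm_loc flen fm_loc → Spec_get_Nend_missmatches Nend_misses rm_loc flen fm_loc (get_Nend_missmatches Nend_misses rm_loc flen fm_loc)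

-- ===== LEMMAS AND PROOFS =====

-- A's first loop is the index of the first element ≥ N (length if none)
theorem pvRmLoop_eq (N : Int) (l : List Int) (acc : Int) :
    pvRmLoop N l acc = acc + (l.findIdx (fun v => N ≤ v) : Int) := by
  induction l generalizing acc with
  | nil => simp [pvRmLoop]
  | cons a t ih =>
    by_cases ha : N ≤ a
    · rw [pvRmLoop, if_pos ha, List.findIdx_cons]
      simp [ha]
    · rw [pvRmLoop, if_neg ha, ih (acc + 1), List.findIdx_cons]
      have hd : (decide (N ≤ a)) = false := decide_eq_false ha
      rw [hd]
      simp [cond]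
      ring

-- B's backward sweep over indices i-1 … 0: result is the first qualifying index
-- in rm.take i if there is one, else the incoming accumulator
theorem pvRmScan_eq (N : Int) (rm : List Int) :
    ∀ (i : Nat), i ≤ rm.length → ∀ (acc : Int),
    pvRmScan N rm i acc =
      (if (rm.take i).findIdx (fun v => N ≤ v) < i then (((rm.take i).findIdx (fun v => N ≤ v)) : Int) else acc) := by
  intro i
  induction i with
  | zero =>
    intro _ acc
    simp [pvRmScan]
  | succ i ih =>
    intro hle acc
    have hi : i < rm.length := by omega
    have hidx : PySem.List.pyGetD rm (i : Int) 0 = rm[i] := by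
      rw [PySem.List.pyGetD_eq_getElem rm 0 (by omega) (by exact_mod_cast hi)]
      simp
    have htake : rm.take (i + 1) = rm.take i ++ [rm[i]] := by
      rw [List.take_succ, List.getElem?_eq_getElem hi]
      rfl
    have hlen : (rm.take i).length = i := by simp; omega
    have hkle : (rm.take i).findIdx (fun v => N ≤ v) ≤ i := by
      have := List.findIdx_le_length (p := fun v => decide (N ≤ v)) (xs := rm.take i)
      omega
    rw [pvRmScan, hidx, ih (by omega), htake, List.findIdx_append, hlen]
    by_cases hki : (rm.take i).findIdx (fun v => N ≤ v) < i
    · rw [if_pos hki, if_pos hki, if_pos (by omega)]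
    · rw [if_neg hki]
      by_cases hv : rm[i] ≥ N
      · rw [if_pos hv]
        have h0 : List.findIdx (fun v => N ≤ v) [rm[i]] = 0 := by
          simp [List.findIdx_cons, hv]
        rw [if_neg hki, h0, if_pos (by omega)]
        simp
      · rw [if_neg hv]
        have h1 : List.findIdx (fun v => N ≤ v) [rm[i]] = 1 := by
          simp only [List.findIdx_cons, List.findIdx_nil]
          have : (decide (N ≤ rm[i])) = false := decide_eq_false (by omega)
          rw [this]
          rfl
        rw [if_neg hki, h1, if_neg (by omega)]

-- the index loop of A walks fm.reverse, counting while values stay ≥ N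
theorem pvFmLoop_go (fm : List Int) (N : Int) :
    ∀ (fuel i : Nat) (acc : Int), 1 ≤ i → i + fuel = fm.length + 1 →
    pvFmLoop fm N i fuel acc = acc + (((fm.reverse.drop (i - 1)).takeWhile (fun v => N ≤ v)).length : Int) := by
  intro fuel
  induction fuel with
  | zero =>
    intro i acc hi hlen
    have : fm.reverse.drop (i - 1) = [] := List.drop_eq_nil_of_le (by simp; omega)
    simp [pvFmLoop, this]
  | succ fuel ih =>
    intro i acc hi hlen
    have hile : i ≤ fm.length := by omega
    have hlt : fm.length - i < fm.length := by omega
    have hget : PySem.List.pyGet? fm (-(i : Int)) = some (fm[fm.length - i]) := by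
      simp only [PySem.List.pyGet?, PySem.List.pyIdx?]
      rw [if_neg (by omega), if_pos (by omega)]
      simp only [Option.bind_some]
      have : ((-(-(i:Int))).toNat) = i := by omega
      rw [this, List.getElem?_eq_getElem hlt]
    have hdrop : fm.reverse.drop (i - 1) = fm[fm.length - i] :: fm.reverse.drop i := by
      have h1 : i - 1 < fm.reverse.length := by simp; omega
      rw [List.drop_eq_getElem_cons h1, List.getElem_reverse]
      congr 2
      · omega
      · omega
    rw [pvFmLoop, hget]
    dsimp only
    by_cases hv : fm[fm.length - i] < N
    · rw [if_pos hv, hdrop]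
      have hp : (decide (N ≤ fm[fm.length - i])) = false := decide_eq_false (by omega)
      rw [List.takeWhile_cons, hp]
      simp
    · rw [if_neg hv, ih (i + 1) (acc + 1) (by omega) (by omega), hdrop]
      have hp : (decide (N ≤ fm[fm.length - i])) = true := decide_eq_true (by omega)
      rw [List.takeWhile_cons, if_pos hp]
      have hsucc : i + 1 - 1 = i := by omega
      rw [hsucc]
      push_cast [List.length_cons]
      ring

-- B's run-length fold: value of the whole run counter
theorem runFold_eq (thr : Int) (l : List Int) :
    ∀ (acc : Int),
    l.foldl (fun acc v => if v ≥ thr then acc + 1 else 0) acc =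
      (if ∀ v ∈ l, thr ≤ v then acc + (l.length : Int)
       else ((l.reverse.takeWhile (fun v => thr ≤ v)).length : Int)) := by
  induction l with
  | nil => intro acc; simp
  | cons a t ih =>
    intro acc
    rw [List.foldl_cons, ih]
    by_cases hall : ∀ v ∈ t, thr ≤ v
    · rw [if_pos hall]
      have htw : t.reverse.takeWhile (fun v => thr ≤ v) = t.reverse := by
        rw [List.takeWhile_eq_self_iff]
        intro x hx
        exact decide_eq_true (hall x (List.mem_reverse.mp hx))
      by_cases ha : a ≥ thr
      · rw [if_pos ha]
        rw [if_pos (show ∀ v ∈ a :: t, thr ≤ v from by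
          intro v hv
          rcases List.mem_cons.mp hv with rfl | h
          · exact ha
          · exact hall v h)]
        push_cast [List.length_cons]
        ring
      · rw [if_neg ha]
        rw [if_neg (show ¬ ∀ v ∈ a :: t, thr ≤ v from by
          intro h; exact ha (h a List.mem_cons_self))]
        have : (a :: t).reverse = t.reverse ++ [a] := by simp
        rw [this, List.takeWhile_append, htw, if_pos rfl]
        have hpa : (decide (thr ≤ a)) = false := decide_eq_false ha
        rw [List.takeWhile_cons, hpa]
        simp
    · rw [if_neg hall, if_neg (by intro h; exact hall (fun v hv => h v (List.mem_cons_of_mem a hv)))]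
      push_neg at hall
      obtain ⟨x, hx, hxn⟩ := hall
      have hshort : (t.reverse.takeWhile (fun v => thr ≤ v)).length ≠ t.reverse.length := by
        intro hcon
        have : t.reverse.takeWhile (fun v => thr ≤ v) = t.reverse :=
          (List.takeWhile_prefix _).eq_of_length hcon
        rw [List.takeWhile_eq_self_iff] at this
        exact absurd (by simpa using this x (List.mem_reverse.mpr hx)) (not_le.mpr hxn)
      have : (a :: t).reverse = t.reverse ++ [a] := by simp
      rw [this, List.takeWhile_append, if_neg hshort]

-- ===== VERDICT (by name: the statement is the Claim_ definition above) =====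
theorem get_Nend_missmatches_spec : Claim_equal_get_Nend_missmatches := by
  intro N rm flen fm _
  unfold Spec_get_Nend_missmatches get_Nend_missmatches get_Nend_missmatches_alt
  have hrmA := pvRmLoop_eq N rm 0
  have hrmB := pvRmScan_eq N rm rm.length le_rfl ((rm.length : Int))
  have hfmA := pvFmLoop_go fm (flen - N) fm.length 1 0 le_rfl (by omega)
  have hfmB := runFold_eq (flen - N) fm 0
  simp only [Nat.sub_self, List.drop_zero] at hfmA
  simp only [List.take_length] at hrmB
  have hfi := List.findIdx_le_length (p := fun v => decide (N ≤ v)) (xs := rm)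
  simp only [Prod.mk.injEq]
  constructor
  · -- fm components
    rw [hfmA, hfmB]
    by_cases hall : ∀ v ∈ fm, flen - N ≤ v
    · rw [if_pos hall]
      have htw : fm.reverse.takeWhile (fun v => flen - N ≤ v) = fm.reverse := by
        rw [List.takeWhile_eq_self_iff]
        intro x hx
        exact decide_eq_true (hall x (List.mem_reverse.mp hx))
      rw [htw, List.length_reverse]
    · rw [if_neg hall]
      ring
  · -- rm components
    rw [hrmA, hrmB]
    by_cases hk : rm.findIdx (fun v => N ≤ v) < rm.length
    · rw [if_pos hk]; ring
    · rw [if_neg hk]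
      have : rm.findIdx (fun v => N ≤ v) = rm.length := by omega
      rw [this]
      ring
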